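-- pv_equiv track=rewrite | github.com/kramttocs/ha-blueiris | custom_components/blueiris/select.py | _build_unique_option_labels
-- ===== SOURCE A (Python) =====
-- from collections import Counter
--
-- def _build_unique_option_labels(indexed_names: list[tuple[int, str]]) -> dict[int, str]:
--     """Build stable display labels, prefixing ids only when names are duplicated."""
--     clean_names = {
--         idx: (str(name).strip() or str(idx))
--         for idx, name in indexed_names
--     }
--     counts = Counter(clean_names.values())
--
--     labels: dict[int, str] = {}
--     for idx, name in clean_names.items():
--         labels[idx] = f"{idx} - {name}" if counts[name] > 1 else name
--
--     return labels
-- ===== SOURCE B (Python) =====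
-- def _build_unique_option_labels(indexed_names: list[tuple[int, str]]) -> dict[int, str]:
--     """Build stable display labels, prefixing ids only when names are duplicated."""
--     clean_names = {
--         idx: (str(name).strip() or str(idx))
--         for idx, name in indexed_names
--     }
--     ordered = sorted(clean_names.values())
--     dup_names = {a for a, b in zip(ordered, ordered[1:]) if a == b}
--     return {
--         idx: (f"{idx} - {name}" if name in dup_names else name)
--         for idx, name in clean_names.items()
--     }
-- ===== Notes on version B (the rewrite author's own statement) =====
-- stated objective: alternative
-- what changed: Replaces the Counter tally and per-item count lookup with a sort-based duplicate finder: the cleaned names are sorted and the set of duplicated names is read off adjacent equal pairs of the sorted list, then labels are emitted by set membership.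
import Mathlib
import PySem

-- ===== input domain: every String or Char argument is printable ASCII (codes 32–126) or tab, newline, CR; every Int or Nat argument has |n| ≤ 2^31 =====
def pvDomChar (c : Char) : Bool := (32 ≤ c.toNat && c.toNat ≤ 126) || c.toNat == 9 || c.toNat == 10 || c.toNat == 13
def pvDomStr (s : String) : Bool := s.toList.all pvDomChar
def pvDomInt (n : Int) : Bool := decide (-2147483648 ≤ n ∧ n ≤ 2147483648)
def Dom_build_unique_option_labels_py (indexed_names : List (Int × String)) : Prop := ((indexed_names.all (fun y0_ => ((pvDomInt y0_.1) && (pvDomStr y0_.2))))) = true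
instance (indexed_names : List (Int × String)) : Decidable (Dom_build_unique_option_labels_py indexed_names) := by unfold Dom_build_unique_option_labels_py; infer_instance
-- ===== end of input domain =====

-- B replaces A's Counter tally with a sort-based duplicate finder (sort the cleaned names, read
-- duplicated names off adjacent equal pairs); same labels in the same key order.
-- ===== PORT A =====
-- shared first comprehension of both sources:
-- clean_names = {idx: (str(name).strip() or str(idx)) for idx, name in indexed_names}
def pvClean (indexed_names : List (Int × String)) : PySem.Dict Int String :=
  indexed_names.foldl
    (fun d p =>
      d.insert p.1 (if PySem.Str.strip p.2 = "" then PySem.Int.toStr p.1 else PySem.Str.strip p.2))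
    PySem.Dict.empty

def build_unique_option_labels_py (indexed_names : List (Int × String)) : List (Int × String) :=
  let clean_names := pvClean indexed_names
  let counts := PySem.Dict.counter clean_names.values
  let labels :=
    clean_names.items.foldl
      (fun lab p =>
        lab.insert p.1
          (if (1 : Int) < counts.getD p.2 0 then PySem.Int.toStr p.1 ++ " - " ++ p.2 else p.2))
      PySem.Dict.empty
  labels.items

-- ===== PORT B =====
def build_unique_option_labels_py_alt (indexed_names : List (Int × String)) : List (Int × String) :=
  let clean_names := pvClean indexed_names
  let ordered := PySem.List.sorted clean_names.values (fun x => x) false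
  -- dup_names = {a for a, b in zip(ordered, ordered[1:]) if a == b}  (ordered[1:] = tail)
  let dup_names : PySem.Set String :=
    PySem.Set.ofList (((ordered.zip ordered.tail).filter (fun p => p.1 == p.2)).map (·.1))
  (clean_names.items.foldl
      (fun lab p =>
        lab.insert p.1
          (if PySem.Set.contains dup_names p.2 then PySem.Int.toStr p.1 ++ " - " ++ p.2 else p.2))
      PySem.Dict.empty).items

-- ===== PRECONDITION & SPEC =====
def Spec_build_unique_option_labels_py (indexed_names : List (Int × String)) (out : List (Int × String)) : Prop := out = build_unique_option_labels_py_alt indexed_names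
instance (indexed_names : List (Int × String)) (out : List (Int × String)) : Decidable (Spec_build_unique_option_labels_py indexed_names out) := by unfold Spec_build_unique_option_labels_py; infer_instance

-- ===== CLAIM (what is proved, stated in full; the proofs are below) =====
def Claim_equal_build_unique_option_labels_py : Prop := ∀ (indexed_names : List (Int × String)), Dom_build_unique_option_labels_py indexed_names → Spec_build_unique_option_labels_py indexed_names (build_unique_option_labels_py indexed_names)

-- ===== LEMMAS AND PROOFS =====

-- In a ≤-sorted list, a value heads an adjacent equal pair iff it occurs more than once.
theorem pv_adj_dup_iff (v : String) :
    ∀ (s : List String), s.Pairwise (· ≤ ·) →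
      (v ∈ ((s.zip s.tail).filter (fun p => p.1 == p.2)).map (·.1) ↔ 1 < s.count v) := by
  intro s
  induction s with
  | nil => simp
  | cons a t ih =>
    cases t with
    | nil =>
      intro _
      simp only [List.tail, List.zip_nil_right, List.filter_nil, List.map_nil,
        List.not_mem_nil, false_iff, not_lt]
      rw [List.count_cons]
      split <;> simp
    | cons b u =>
      intro hp
      have hab : a ≤ b := (List.pairwise_cons.mp hp).1 b (by simp)
      have hpt : (b :: u).Pairwise (· ≤ ·) := (List.pairwise_cons.mp hp).2
      have iht := ih hpt
      have hzip : (a :: b :: u).zip (a :: b :: u).tail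
          = (a, b) :: ((b :: u).zip (b :: u).tail) := rfl
      have hcnt : (a :: b :: u).count v = (b :: u).count v + (if a = v then 1 else 0) := by
        rw [List.count_cons]
        simp
      rw [hzip, List.filter_cons]
      by_cases hab2 : a = b
      · rw [if_pos (by simpa using hab2)]
        by_cases hva : v = a
        · refine iff_of_true (by simp [hva]) ?_
          have h1 : 0 < (b :: u).count v := List.count_pos_iff.mpr (by simp [hva, hab2])
          rw [hcnt, if_pos hva.symm]
          omega
        · rw [hcnt, if_neg (fun h => hva h.symm)]
          simpa [hva] using iht
      · rw [if_neg (by simpa using hab2)]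
        by_cases hva : v = a
        · have hlt : a < b := lt_of_le_of_ne hab hab2
          have hnot : v ∉ b :: u := by
            intro hmem
            rcases List.mem_cons.mp hmem with h | h
            · exact hab2 (hva ▸ h)
            · have hbx : b ≤ v := (List.pairwise_cons.mp hpt).1 v h
              have : a < v := hlt.trans_le hbx
              rw [hva] at this
              exact lt_irrefl a this
          have hc0 : (b :: u).count v = 0 := List.count_eq_zero.mpr hnot
          refine iff_of_false (fun hmem => ?_) (fun hgt => ?_)
          · have := iht.mp hmem
            omega
          · rw [hcnt, if_pos hva.symm, hc0] at hgt
            omega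
        · rw [hcnt, if_neg (fun h => hva h.symm)]
          simpa using iht

-- ===== VERDICT (by name: the statement is the Claim_ definition above) =====
theorem build_unique_option_labels_py_spec : Claim_equal_build_unique_option_labels_py := by
  intro xs _
  unfold Spec_build_unique_option_labels_py build_unique_option_labels_py build_unique_option_labels_py_alt
  dsimp only
  congr 2
  funext lab p
  congr 1
  set vals := (pvClean xs).values with hvals
  have hsortperm : (PySem.List.sorted vals (fun x => x) false).Perm vals :=
    PySem.List.sorted_perm vals (fun x => x) false
  have hpw : (PySem.List.sorted vals (fun x => x) false).Pairwise (· ≤ ·) := by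
    simpa using PySem.List.sorted_pairwise vals (fun x => x)
  have hiff :
      ((1 : Int) < (PySem.Dict.counter vals).getD p.2 0) ↔
        (PySem.Set.contains
          (PySem.Set.ofList
            ((((PySem.List.sorted vals (fun x => x) false).zip
                (PySem.List.sorted vals (fun x => x) false).tail).filter
                (fun q => q.1 == q.2)).map (·.1))) p.2 = true) := by
    rw [PySem.Dict.getD_counter, PySem.Set.contains_iff, PySem.Set.mem_ofList,
      pv_adj_dup_iff p.2 _ hpw, hsortperm.count_eq]
    constructor
    · intro h; exact_mod_cast h
    · intro h; exact_mod_cast h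
  split_ifs with h1 h2 h2
  · rfl
  · exact absurd (hiff.mp h1) h2
  · exact absurd (hiff.mpr h2) h1
  · rfl
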